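-- pv_equiv track=rewrite | github.com/brunospcastro/IA-Tetris | student.py | holesRight
-- ===== SOURCE A (Python) =====
-- def holesRight(game):
--     if len(game) < 2:
--         return 0
--     x = game[1][1] - game[0][1]
--     if x > 0:
--         return x + holesRight(game[1:])
--     else:
--         return holesRight(game[1:])
-- ===== SOURCE B (Python) =====
-- def holesRight(game):
--     total = 0
--     for prev, cur in zip(game, game[1:]):
--         d = cur[1] - prev[1]
--         if d > 0:
--             total += d
--     return total
-- ===== Notes on version B (the rewrite author's own statement) =====
-- stated objective: simpler
-- what changed: Replaced the recursion over game[1:] slices with a single iterative accumulator pass over zip(game, game[1:]).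
import Mathlib
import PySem

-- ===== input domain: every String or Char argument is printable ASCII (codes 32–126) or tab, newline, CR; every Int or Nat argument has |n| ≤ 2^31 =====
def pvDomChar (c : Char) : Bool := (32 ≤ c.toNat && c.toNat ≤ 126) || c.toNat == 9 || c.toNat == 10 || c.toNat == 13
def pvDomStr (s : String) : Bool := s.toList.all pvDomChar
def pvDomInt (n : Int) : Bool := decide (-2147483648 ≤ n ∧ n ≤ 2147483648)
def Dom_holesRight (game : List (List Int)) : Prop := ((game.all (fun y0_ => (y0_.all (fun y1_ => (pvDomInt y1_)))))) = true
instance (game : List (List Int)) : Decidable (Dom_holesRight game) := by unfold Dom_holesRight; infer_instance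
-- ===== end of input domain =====

-- B replaces A's recursion over game[1:] slices by one iterative accumulator pass
-- over zip(game, game[1:]) (objective: simpler).

-- ===== PORT A =====
-- row[1], totalized with 0 outside Pre_ (Pre_ guarantees the index is in range)
def pvRow1 (r : List Int) : Int := (PySem.List.pyGet? r 1).getD 0

def holesRight : List (List Int) → Int
  | [] => 0
  | [_] => 0
  | a :: b :: rest =>
      let x := pvRow1 b - pvRow1 a
      if x > 0 then x + holesRight (b :: rest) else holesRight (b :: rest)

-- ===== PORT B =====
def holesRight_alt (game : List (List Int)) : Int :=
  (game.zip (PySem.List.slice game (some 1) none)).foldl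
    (fun total pc =>
      let d := pvRow1 pc.2 - pvRow1 pc.1
      if d > 0 then total + d else total) 0

-- ===== PRECONDITION & SPEC =====
-- Pre_ excludes exactly the inputs where A raises IndexError: a row shorter than 2
-- elements in a game with at least 2 rows (game[i][1] is out of range there).
def Pre_holesRight (game : List (List Int)) : Prop :=
  game.length < 2 ∨ ∀ r ∈ game, 2 ≤ r.length
instance (game : List (List Int)) : Decidable (Pre_holesRight game) := by
  unfold Pre_holesRight; infer_instance

def pvWitness_holesRight : List (List Int) := [[0, 1], [0, 3], [0, 2]]

def Spec_holesRight (game : List (List Int)) (out : Int) : Prop := out = holesRight_alt game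
instance (game : List (List Int)) (out : Int) : Decidable (Spec_holesRight game out) := by
  unfold Spec_holesRight; infer_instance

-- ===== CLAIM (what is proved, stated in full; the proofs are below) =====
def Claim_equal_holesRight : Prop :=
  ∀ (game : List (List Int)), Dom_holesRight game → Pre_holesRight game →
    Spec_holesRight game (holesRight game)

-- ===== LEMMAS AND PROOFS =====
theorem alt_step (f : List Int × List Int → Int)
    (l : List (List Int × List Int)) (c init : Int) :
    l.foldl (fun total pc => if f pc > 0 then total + f pc else total) (c + init)
      = c + l.foldl (fun total pc => if f pc > 0 then total + f pc else total) init := by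
  induction l generalizing init with
  | nil => rfl
  | cons p l ih =>
      simp only [List.foldl_cons]
      split_ifs with h
      · rw [add_assoc, ih]
      · exact ih init

theorem alt_unfold (a b : List Int) (rest : List (List Int)) :
    holesRight_alt (a :: b :: rest)
      = (if pvRow1 b - pvRow1 a > 0 then pvRow1 b - pvRow1 a else 0)
          + holesRight_alt (b :: rest) := by
  simp only [holesRight_alt, PySem.List.slice_from_one, List.tail_cons,
    List.zip_cons_cons, List.foldl_cons]
  split_ifs with h
  · rw [show (0 + (pvRow1 b - pvRow1 a)) = (pvRow1 b - pvRow1 a) + 0 by ring,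
      alt_step (fun pc => pvRow1 pc.2 - pvRow1 pc.1)]
  · simp

theorem hr_eq (game : List (List Int)) : holesRight game = holesRight_alt game := by
  induction game with
  | nil => rfl
  | cons a rest ih =>
      cases rest with
      | nil => rfl
      | cons b rest' =>
          rw [alt_unfold]
          simp only [holesRight]
          have ih' : holesRight (b :: rest') = holesRight_alt (b :: rest') := ih
          split_ifs with h <;> simp [ih']

-- ===== VERDICT (by name: the statement is the Claim_ definition above) =====
theorem holesRight_spec : Claim_equal_holesRight := by
  intro game _ _
  unfold Spec_holesRight
  exact hr_eq game
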